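-- pv_equiv track=rewrite | github.com/ldydek/AGH-WDI | WDI/Set 6/ex11.py | ex12
-- ===== SOURCE A (Python) =====
-- def ex12(T, k, index):
--     quantity = 0
--     if k == 1:
--         quantity += 1
--     for x in range(index, -1, -1):
--         if k % T[index] == 0:
--             quantity += ex12(T, k//T[index], index-1)
--     return quantity
-- ===== SOURCE B (Python) =====
-- def ex12(T, k, index):
--     # The branching recursion in A makes index+1 identical subcalls; collapse
--     # each into a single multiplication and walk the index chain iteratively.
--     total = 0
--     mult = 1
--     while True:
--         if k == 1:
--             total += mult
--         if index < 0 or k % T[index] != 0: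
--             return total
--         mult *= index + 1
--         k //= T[index]
--         index -= 1
-- ===== Notes on version B (the rewrite author's own statement) =====
-- stated objective: alternative
-- what changed: A's loop makes index+1 identical recursive calls per level (a branching recursion); B collapses them into one multiplication by (index+1) and walks the single index chain with an iterative accumulator (intended as asymptotically faster on long divisor chains; a timing run measured only ~1.55x at the largest size, not consistently).
-- outside the precondition, e.g. on ex12([0, 3], 5, 1): A returns 0, B returns 0
import Mathlib
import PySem

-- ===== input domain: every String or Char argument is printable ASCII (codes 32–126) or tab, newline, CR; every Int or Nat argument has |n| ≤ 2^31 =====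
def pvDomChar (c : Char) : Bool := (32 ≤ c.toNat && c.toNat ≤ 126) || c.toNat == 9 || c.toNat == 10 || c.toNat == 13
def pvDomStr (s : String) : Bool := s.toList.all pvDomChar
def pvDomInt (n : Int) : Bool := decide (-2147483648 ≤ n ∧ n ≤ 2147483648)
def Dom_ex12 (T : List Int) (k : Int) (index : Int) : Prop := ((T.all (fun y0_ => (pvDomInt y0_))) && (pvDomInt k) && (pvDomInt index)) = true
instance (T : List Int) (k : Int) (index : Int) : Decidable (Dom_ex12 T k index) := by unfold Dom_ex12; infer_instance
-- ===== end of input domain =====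

-- B replaces A's index+1 identical recursive calls per level by a single
-- multiplication by (index+1) and an iterative walk down the index chain.

-- ===== PORT A =====
-- literal port of A: the for-loop over range(index, -1, -1) is ex12Loop, a
-- structural walk over the attached range list (attach only supplies the
-- membership fact needed for termination); the loop body is A's body verbatim.
mutual
def ex12 (T : List Int) (k : Int) (index : Int) : Int :=
  let quantity : Int := if k = 1 then 1 else 0
  ex12Loop T k index (PySem.List.pyRange index (-1) (-1)).attach quantity
termination_by ((index + 1).toNat, (PySem.List.pyRange index (-1) (-1)).attach.length + 1)
decreasing_by exact Prod.Lex.right _ (Nat.lt_succ_self _)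

def ex12Loop (T : List Int) (k : Int) (index : Int)
    (l : List {x // x ∈ PySem.List.pyRange index (-1) (-1)}) (q : Int) : Int :=
  match l with
  | [] => q
  | x :: rest =>
    let q' :=
      match PySem.List.pyGet? T index with
      | none => q          -- IndexError in Python: outside Pre_ex12
      | some t =>
        if PySem.Int.mod k t = 0 then q + ex12 T (PySem.Int.floordiv k t) (index - 1)
        else q
    ex12Loop T k index rest q'
termination_by ((index + 1).toNat, l.length)
decreasing_by
  · have hx := (PySem.List.mem_pyRange_neg_one).mp x.2
    exact Prod.Lex.left _ _ (by omega)
  · exact Prod.Lex.right _ (by simp)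
end

-- ===== PORT B =====
def ex12Go (T : List Int) (total mult k index : Int) : Int :=
  let total' := if k = 1 then total + mult else total
  if h : index < 0 then total'
  else
    match PySem.List.pyGet? T index with
    | none => total'       -- IndexError in Python: outside Pre_ex12
    | some t =>
      if PySem.Int.mod k t ≠ 0 then total'
      else ex12Go T total' (mult * (index + 1)) (PySem.Int.floordiv k t) (index - 1)
termination_by (index + 1).toNat
decreasing_by omega

def ex12_alt (T : List Int) (k : Int) (index : Int) : Int :=
  ex12Go T 0 1 k index

-- ===== PRECONDITION & SPEC =====
-- Pre_ requires index < len(T) (else IndexError) and no zero among T[0..index]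
-- (a zero there can be hit as a divisor, a ZeroDivisionError); this is slightly
-- conservative: it also excludes inputs where a zero sits below a point at which
-- divisibility already fails, on which A returns normally (see cites).
def Pre_ex12 (T : List Int) (k : Int) (index : Int) : Prop :=
  index < (T.length : Int) ∧ ∀ x ∈ T.take (index + 1).toNat, x ≠ 0
instance (T : List Int) (k : Int) (index : Int) : Decidable (Pre_ex12 T k index) := by
  unfold Pre_ex12; infer_instance

def pvWitness_ex12 : List Int × Int × Int := ([2, 3, 6], 6, 2)

def Spec_ex12 (T : List Int) (k : Int) (index : Int) (out : Int) : Prop := out = ex12_alt T k index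
instance (T : List Int) (k : Int) (index : Int) (out : Int) : Decidable (Spec_ex12 T k index out) := by unfold Spec_ex12; infer_instance

-- ===== CLAIM (what is proved, stated in full; the proofs are below) =====
def Claim_equal_ex12 : Prop := ∀ (T : List Int) (k : Int) (index : Int), Dom_ex12 T k index → Pre_ex12 T k index → Spec_ex12 T k index (ex12 T k index)

-- ===== LEMMAS AND PROOFS =====

-- one recursion step of A, as seen from the closed form of its loop
def ex12Step (T : List Int) (k : Int) (index : Int) : Int :=
  match PySem.List.pyGet? T index with
  | none => 0
  | some t =>
    if PySem.Int.mod k t = 0 then ex12 T (PySem.Int.floordiv k t) (index - 1) else 0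

lemma ex12Loop_eq (T : List Int) (k : Int) (index : Int) :
    ∀ (l : List {x // x ∈ PySem.List.pyRange index (-1) (-1)}) (q : Int),
      ex12Loop T k index l q = q + l.length * ex12Step T k index := by
  intro l
  induction l with
  | nil => intro q; rw [ex12Loop]; simp
  | cons x rest ih =>
      intro q
      rw [ex12Loop]
      cases hg : PySem.List.pyGet? T index with
      | none =>
          have hstep : ex12Step T k index = 0 := by rw [ex12Step]; simp [hg]
          rw [ih, hstep]; simp only [List.length_cons]; push_cast; ring
      | some t =>
          by_cases hm : PySem.Int.mod k t = 0
          · have hstep : ex12Step T k index = ex12 T (PySem.Int.floordiv k t) (index - 1) := by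
              rw [ex12Step]; simp [hg, hm]
            simp only [if_pos hm]
            rw [ih, hstep]; simp only [List.length_cons]; push_cast; ring
          · have hstep : ex12Step T k index = 0 := by rw [ex12Step]; simp [hg, hm]
            simp only [if_neg hm]
            rw [ih, hstep]; simp only [List.length_cons]; push_cast; ring

lemma ex12_of_neg (T : List Int) (k : Int) (index : Int) (h : index < 0) :
    ex12 T k index = if k = 1 then 1 else 0 := by
  rw [ex12, ex12Loop_eq, List.length_attach, PySem.List.length_pyRange_neg_one,
    show (index - -1).toNat = 0 by omega]
  simp

lemma ex12_of_nonneg (T : List Int) (k : Int) (index : Int) (h : 0 ≤ index) :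
    ex12 T k index = (if k = 1 then 1 else 0) + (index + 1) * ex12Step T k index := by
  rw [ex12, ex12Loop_eq]
  have hlen : (((PySem.List.pyRange index (-1) (-1)).attach.length : Nat) : Int) = index + 1 := by
    rw [List.length_attach, PySem.List.length_pyRange_neg_one]
    omega
  rw [hlen]

lemma ex12Go_spec (n : Nat) : ∀ (T : List Int) (total mult k index : Int),
    (index + 1).toNat = n →
    ex12Go T total mult k index = total + mult * ex12 T k index := by
  induction n with
  | zero =>
      intro T total mult k index hn
      have hneg : index < 0 := by omega
      rw [ex12Go, ex12_of_neg T k index hneg]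
      simp only [dif_pos hneg]
      by_cases hk : k = 1 <;> simp [hk] <;> try ring
  | succ n ih =>
      intro T total mult k index hn
      have hpos : 0 ≤ index := by omega
      rw [ex12Go]
      simp only [dif_neg (by omega : ¬ index < 0)]
      rw [ex12_of_nonneg T k index hpos, ex12Step]
      cases hg : PySem.List.pyGet? T index with
      | none =>
          by_cases hk : k = 1 <;> simp [hk] <;> try ring
      | some t =>
          by_cases hm : PySem.Int.mod k t = 0
          · simp only [if_pos hm, if_neg (not_not_intro hm)]
            rw [ih T _ _ _ _ (by omega)]
            by_cases hk : k = 1 <;> simp [hk] <;> try ring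
          · simp only [if_neg hm, if_pos hm]
            by_cases hk : k = 1 <;> simp [hk] <;> try ring

-- ===== VERDICT (by name: the statement is the Claim_ definition above) =====
theorem ex12_spec : Claim_equal_ex12 := by
  intro T k index _hdom _hpre
  show ex12 T k index = ex12_alt T k index
  rw [ex12_alt, ex12Go_spec ((index + 1).toNat) T 0 1 k index rfl]
  ring
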